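-- pv_equiv track=rewrite | github.com/jackalkarlos/CTF-Writeups-and-Scripts | Scripts/LexicographicNumbersGenerator.py | generate_lexicographic_wordlist
-- ===== SOURCE A (Python) =====
-- def generate_lexicographic_wordlist(min_number, max_number):
--     # Initialize an empty list to store the lexicographic numbers
--     lexicographic_wordlist = []
--
--     # Iterate through the range of numbers from min_number to max_number
--     for number in range(min_number, max_number + 1):
--         # Convert the number to a string and split it into a list of digits
--         digits = [int(digit) for digit in str(number)]
--         # Sort the digits in increasing order
--         digits.sort()
--         # Concatenate the digits to form a lexicographic number
--         lexicographic_number = ''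
--         for digit in digits:
--             lexicographic_number += str(digit)
--         # Add the lexicographic number to the wordlist
--         lexicographic_wordlist.append(lexicographic_number)
--
--     return lexicographic_wordlist
-- ===== SOURCE B (Python) =====
-- def generate_lexicographic_wordlist(min_number, max_number):
--     result = []
--     for number in range(min_number, max_number + 1):
--         # histogram of digit values (counting sort instead of comparison sort)
--         counts = [0] * 10
--         for ch in str(number):
--             counts[int(ch)] += 1
--         result.append(''.join(str(d) * counts[d] for d in range(10)))
--     return result
-- ===== Notes on version B (the rewrite author's own statement) =====
-- stated objective: alternative
-- what changed: Per number, A comparison-sorts the digit list and concatenates with repeated string appends; B builds a 10-bucket digit histogram (counting sort) and emits str(d)*count[d] for d in 0..9.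
import Mathlib
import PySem

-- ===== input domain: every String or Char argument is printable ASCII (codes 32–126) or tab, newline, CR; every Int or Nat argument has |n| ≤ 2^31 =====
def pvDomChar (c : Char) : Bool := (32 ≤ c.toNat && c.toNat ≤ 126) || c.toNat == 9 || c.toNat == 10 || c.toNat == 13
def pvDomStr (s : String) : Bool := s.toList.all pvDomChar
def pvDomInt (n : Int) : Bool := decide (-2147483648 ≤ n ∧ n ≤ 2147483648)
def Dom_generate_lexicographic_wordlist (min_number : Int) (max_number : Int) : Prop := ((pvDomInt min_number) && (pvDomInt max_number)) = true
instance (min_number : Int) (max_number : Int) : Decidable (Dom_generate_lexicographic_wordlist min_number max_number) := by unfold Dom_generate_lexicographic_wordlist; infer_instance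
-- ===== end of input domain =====

-- B replaces A's per-number comparison sort + string-append loop by a digit histogram
-- (counting sort over the ten digit values); objective: alternative algorithm, not faster.

-- ===== PORT A =====
def generate_lexicographic_wordlist (min_number : Int) (max_number : Int) : List String :=
  (PySem.List.pyRange min_number (max_number + 1) 1).foldl (fun wl number =>
    -- digits = [int(digit) for digit in str(number)]  (int('-') would raise: outside Pre_)
    let digits : List Int := (PySem.Int.toChars number).map (fun c => (PySem.Int.ofChars? [c]).getD 0)
    -- digits.sort()
    let digits := PySem.List.sorted digits (fun x => x) false
    -- lexicographic_number = ''; for digit in digits: lexicographic_number += str(digit)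
    let lex : List Char := digits.foldl (fun s d => s ++ PySem.Int.toChars d) []
    wl ++ [String.ofList lex]) []

-- ===== PORT B =====
def generate_lexicographic_wordlist_alt (min_number : Int) (max_number : Int) : List String :=
  (PySem.List.pyRange min_number (max_number + 1) 1).foldl (fun res number =>
    -- counts = [0]*10; for ch in str(number): counts[int(ch)] += 1
    let counts : List Int := (PySem.Int.toChars number).foldl
      (fun cnt ch =>
        let v := (PySem.Int.ofChars? [ch]).getD 0
        PySem.List.pySetD cnt v (PySem.List.pyGetD cnt v 0 + 1))
      (List.replicate 10 (0 : Int))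
    -- ''.join(str(d) * counts[d] for d in range(10))
    let s : List Char := PySem.Chars.join []
      ((PySem.List.pyRange 0 10 1).map (fun d =>
        PySem.List.pyRepeat (PySem.Int.toChars d) (PySem.List.pyGetD counts d 0)))
    res ++ [String.ofList s]) []

-- ===== PRECONDITION & SPEC =====
-- Pre_ excludes exactly the inputs where the range contains a negative number: there
-- Python's int('-') raises ValueError in A (and in B alike).
def Pre_generate_lexicographic_wordlist (min_number : Int) (max_number : Int) : Prop :=
  0 ≤ min_number ∨ max_number < min_number
instance (min_number : Int) (max_number : Int) : Decidable (Pre_generate_lexicographic_wordlist min_number max_number) := by unfold Pre_generate_lexicographic_wordlist; infer_instance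
def pvWitness_generate_lexicographic_wordlist : Int × Int := (0, 12)

def Spec_generate_lexicographic_wordlist (min_number : Int) (max_number : Int) (out : List String) : Prop := out = generate_lexicographic_wordlist_alt min_number max_number
instance (min_number : Int) (max_number : Int) (out : List String) : Decidable (Spec_generate_lexicographic_wordlist min_number max_number out) := by unfold Spec_generate_lexicographic_wordlist; infer_instance

-- ===== CLAIM (what is proved, stated in full; the proofs are below) =====
def Claim_equal_generate_lexicographic_wordlist : Prop := ∀ (min_number : Int) (max_number : Int), Dom_generate_lexicographic_wordlist min_number max_number → Pre_generate_lexicographic_wordlist min_number max_number → Spec_generate_lexicographic_wordlist min_number max_number (generate_lexicographic_wordlist min_number max_number)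

-- ===== LEMMAS AND PROOFS =====

-- the decimal digit values of a natural number, most significant first
def pvDigits (n : Nat) : List Nat :=
  if h : n < 10 then [n] else pvDigits (n / 10) ++ [n % 10]
  termination_by n
  decreasing_by exact Nat.div_lt_self (by omega) (by omega)

theorem pvDigits_lt (n : Nat) : ∀ d ∈ pvDigits n, d < 10 := by
  induction n using pvDigits.induct with
  | case1 n h => simpa [pvDigits, h] using h
  | case2 n h ih =>
    rw [pvDigits]; simp [h]
    rintro d (hd | rfl)
    · exact ih d hd
    · omega

theorem pvToDigitsCore_eq (f : Nat) : ∀ (n : Nat) (acc : List Char), n < f →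
    Nat.toDigitsCore 10 f n acc = (pvDigits n).map Nat.digitChar ++ acc := by
  induction f with
  | zero => intro n acc h; omega
  | succ f ih =>
    intro n acc h
    rw [Nat.toDigitsCore]
    by_cases h10 : n / 10 = 0
    · have hn : n < 10 := by omega
      simp [h10, pvDigits, hn, Nat.mod_eq_of_lt hn]
    · rw [ih (n / 10) _ (by omega)]
      have hn : ¬ n < 10 := by omega
      conv_rhs => rw [pvDigits]
      simp [h10, hn]

theorem pvToChars_nonneg (n : Int) (h : 0 ≤ n) :
    PySem.Int.toChars n = (pvDigits n.toNat).map Nat.digitChar := by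
  rw [PySem.Int.toChars, if_neg (by omega), Nat.toDigits, pvToDigitsCore_eq _ _ _ (by omega)]
  simp

theorem pvToChars_small (d : Nat) (h : d < 10) :
    PySem.Int.toChars (d : Int) = [Nat.digitChar d] := by
  rw [pvToChars_nonneg _ (by omega)]
  simp [pvDigits, h]

theorem pvDig_digitChar (d : Nat) (h : d < 10) :
    (PySem.Int.ofChars? [Nat.digitChar d]).getD 0 = (d : Int) := by
  interval_cases d <;> decide

theorem pvCounts_getD (l : List Nat) (hl : ∀ d ∈ l, d < 10) :
    ∀ (v : List Int), v.length = 10 → ∀ d : Nat, d < 10 →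
    ((l.foldl (fun cnt x => cnt.set x (cnt.getD x 0 + 1)) v).getD d 0)
      = v.getD d 0 + (l.count d : Int) := by
  induction l with
  | nil => intro v hv d hd; simp
  | cons x l ih =>
    intro v hv d hd
    have hl' : ∀ d ∈ l, d < 10 := fun d hd => hl d (by simp [hd])
    simp only [List.foldl_cons]
    rw [ih hl' _ (by simp [hv]) d hd]
    have hset : (v.set x (v.getD x 0 + 1)).getD d 0
        = if d = x then v.getD x 0 + 1 else v.getD d 0 := by
      by_cases hdx : d = x
      · subst hdx; simp [List.getD_eq_getElem?_getD, hv, hd]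
      · simp [List.getD_eq_getElem?_getD, hdx, Ne.symm hdx]
    rw [hset, List.count_cons]
    by_cases hdx : d = x <;> simp [hdx, Ne.symm] <;> push_cast <;> omega

set_option maxHeartbeats 1000000 in
theorem pvSorted_eq_blocks (l : List Int) (hl : ∀ x ∈ l, 0 ≤ x ∧ x < 10) :
    PySem.List.sorted l (fun x => x) false
      = (PySem.List.pyRange 0 10 1).flatMap (fun d => List.replicate (l.count d) d) := by
  have hr : PySem.List.pyRange 0 10 1 = [0,1,2,3,4,5,6,7,8,9] := by decide
  have hperm : ((PySem.List.pyRange 0 10 1).flatMap (fun d => List.replicate (l.count d) d)).Perm l := by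
    rw [List.perm_iff_count]
    intro a
    rw [hr]
    simp only [List.flatMap_cons, List.flatMap_nil, List.count_append, List.count_replicate,
      List.append_nil]
    by_cases ha : 0 ≤ a ∧ a < 10
    · obtain ⟨h0, h1⟩ := ha
      interval_cases a <;> simp
    · have hna : a ∉ l := fun hm => ha ⟨(hl a hm).1, (hl a hm).2⟩
      rw [List.count_eq_zero_of_not_mem hna]
      have h0 : a ≠ 0 := by omega
      have h1 : a ≠ 1 := by omega
      have h2 : a ≠ 2 := by omega
      have h3 : a ≠ 3 := by omega
      have h4 : a ≠ 4 := by omega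
      have h5 : a ≠ 5 := by omega
      have h6 : a ≠ 6 := by omega
      have h7 : a ≠ 7 := by omega
      have h8 : a ≠ 8 := by omega
      have h9 : a ≠ 9 := by omega
      simp [Ne.symm h0, Ne.symm h1, Ne.symm h2, Ne.symm h3, Ne.symm h4, Ne.symm h5,
        Ne.symm h6, Ne.symm h7, Ne.symm h8, Ne.symm h9]
  have hpw : ((PySem.List.pyRange 0 10 1).flatMap (fun d => List.replicate (l.count d) d)).Pairwise (fun a b => a ≤ b) := by
    rw [List.pairwise_flatMap]
    constructor
    · intro a _; exact List.pairwise_replicate.mpr (Or.inr le_rfl)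
    · apply List.Pairwise.imp ?_ (PySem.List.pairwise_lt_pyRange_one 0 10)
      intro a b hab x hx y hy
      rw [List.eq_of_mem_replicate hx, List.eq_of_mem_replicate hy]
      omega
  exact PySem.List.eq_of_perm_of_pairwise_le_of_injective (fun x => x) (fun a b h => h)
    ((PySem.List.sorted_perm l (fun x => x) false).trans hperm.symm)
    (PySem.List.sorted_pairwise l (fun x => x)) hpw

theorem pvJoin_nil (parts : List (List Char)) : PySem.Chars.join [] parts = parts.flatten := by
  simp only [PySem.Chars.join]
  induction parts with
  | nil => simp [List.intercalate]
  | cons x t ih =>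
    cases t with
    | nil => simp [List.intercalate]
    | cons y s =>
      simp only [List.intercalate, List.intersperse_cons₂, List.flatten_cons] at ih ⊢
      simp [← ih]

-- the per-number strings agree
theorem pvBody_eq (number : Int) (h : 0 ≤ number) :
    (PySem.List.sorted ((PySem.Int.toChars number).map (fun c => (PySem.Int.ofChars? [c]).getD 0)) (fun x => x) false).foldl (fun s d => s ++ PySem.Int.toChars d) ([] : List Char)
      = PySem.Chars.join []
        ((PySem.List.pyRange 0 10 1).map (fun d =>
          PySem.List.pyRepeat (PySem.Int.toChars d)
            (PySem.List.pyGetD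
              ((PySem.Int.toChars number).foldl
                (fun cnt ch =>
                  let v := (PySem.Int.ofChars? [ch]).getD 0
                  PySem.List.pySetD cnt v (PySem.List.pyGetD cnt v 0 + 1))
                (List.replicate 10 (0 : Int))) d 0))) := by
  rw [pvToChars_nonneg number h]
  set ℓ := pvDigits number.toNat with hℓ
  have hlt : ∀ d ∈ ℓ, d < 10 := pvDigits_lt _
  -- A's digit list is the numeric digit list, cast to Int
  have hdig : ((ℓ.map Nat.digitChar).map (fun c => (PySem.Int.ofChars? [c]).getD 0)) = ℓ.map (Nat.cast : Nat → Int) := by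
    rw [List.map_map]
    apply List.map_congr_left
    intro d hd
    exact pvDig_digitChar d (hlt d hd)
  rw [hdig]
  have hL : ∀ x ∈ ℓ.map (Nat.cast : Nat → Int), 0 ≤ x ∧ x < 10 := by
    intro x hx
    simp only [List.mem_map] at hx
    obtain ⟨d, hd, rfl⟩ := hx
    exact ⟨by positivity, by exact_mod_cast hlt d hd⟩
  rw [pvSorted_eq_blocks _ hL, PySem.List.foldl_append_eq_flatMap, List.nil_append]
  -- B's histogram loop is the Nat-indexed counting loop
  have hcounts : ((ℓ.map Nat.digitChar).foldl
      (fun cnt ch =>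
        let v := (PySem.Int.ofChars? [ch]).getD 0
        PySem.List.pySetD cnt v (PySem.List.pyGetD cnt v 0 + 1))
      (List.replicate 10 (0 : Int)))
      = ℓ.foldl (fun cnt d => cnt.set d (cnt.getD d 0 + 1)) (List.replicate 10 (0 : Int)) := by
    rw [List.foldl_map]
    apply PySem.List.foldl_congr_mem
    intro acc d hd
    simp only [pvDig_digitChar d (hlt d hd), PySem.List.pySetD_natCast, PySem.List.pyGetD_natCast]
  rw [hcounts]
  have hget : ∀ d : Nat, d < 10 →
      (ℓ.foldl (fun cnt d => cnt.set d (cnt.getD d 0 + 1)) (List.replicate 10 (0 : Int))).getD d 0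
        = (ℓ.count d : Int) := by
    intro d hd
    rw [pvCounts_getD ℓ hlt _ (by simp) d hd]
    interval_cases d <;> simp
  have hcast : ∀ k : Nat, (ℓ.map (Nat.cast : Nat → Int)).count ((k : Nat) : Int) = ℓ.count k := by
    intro k
    exact List.count_map_of_injective ℓ (Nat.cast : Nat → Int) (fun a b hab => by omega) k
  have hrep : ∀ (k : Nat), k < 10 → ∀ n : Nat,
      (List.replicate n ((k : Nat) : Int)).flatMap PySem.Int.toChars = List.replicate n (Nat.digitChar k) := by
    intro k hk n
    induction n with
    | zero => simp
    | succ n ih => simp [List.replicate_succ, ih, pvToChars_small k hk]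
  have hr : PySem.List.pyRange 0 10 1 = [0,1,2,3,4,5,6,7,8,9] := by decide
  rw [hr, pvJoin_nil]
  simp only [List.flatMap_cons, List.flatMap_nil, List.map_cons, List.map_nil, List.flatten_cons,
    List.flatten_nil, List.append_nil, PySem.List.pyGetD_ofNat']
  rw [hget 0 (by omega), hget 1 (by omega), hget 2 (by omega), hget 3 (by omega), hget 4 (by omega),
    hget 5 (by omega), hget 6 (by omega), hget 7 (by omega), hget 8 (by omega), hget 9 (by omega)]
  simp only [show (0:Int) = ((0:Nat):Int) by simp, show (1:Int) = ((1:Nat):Int) by simp,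
    show (2:Int) = ((2:Nat):Int) by simp, show (3:Int) = ((3:Nat):Int) by simp,
    show (4:Int) = ((4:Nat):Int) by simp, show (5:Int) = ((5:Nat):Int) by simp,
    show (6:Int) = ((6:Nat):Int) by simp, show (7:Int) = ((7:Nat):Int) by simp,
    show (8:Int) = ((8:Nat):Int) by simp, show (9:Int) = ((9:Nat):Int) by simp]
  rw [hcast 0, hcast 1, hcast 2, hcast 3, hcast 4, hcast 5, hcast 6, hcast 7, hcast 8, hcast 9]
  simp only [List.flatMap_append]
  rw [hrep 0 (by omega), hrep 1 (by omega), hrep 2 (by omega), hrep 3 (by omega), hrep 4 (by omega),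
    hrep 5 (by omega), hrep 6 (by omega), hrep 7 (by omega), hrep 8 (by omega), hrep 9 (by omega)]
  rw [pvToChars_small 0 (by omega), pvToChars_small 1 (by omega), pvToChars_small 2 (by omega),
    pvToChars_small 3 (by omega), pvToChars_small 4 (by omega), pvToChars_small 5 (by omega),
    pvToChars_small 6 (by omega), pvToChars_small 7 (by omega), pvToChars_small 8 (by omega),
    pvToChars_small 9 (by omega)]
  simp [PySem.List.pyRepeat_singleton]

-- ===== VERDICT (by name: the statement is the Claim_ definition above) =====
theorem generate_lexicographic_wordlist_spec : Claim_equal_generate_lexicographic_wordlist := by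
  intro mn mx _ hpre
  unfold Spec_generate_lexicographic_wordlist
  unfold generate_lexicographic_wordlist generate_lexicographic_wordlist_alt
  rw [PySem.List.foldl_append_singleton_eq_map, PySem.List.foldl_append_singleton_eq_map]
  simp only [List.nil_append]
  apply List.map_congr_left
  intro n hn
  have hn0 : 0 ≤ n := by
    rcases hpre with h | h
    · exact le_trans h (PySem.List.mem_pyRange_one.mp hn).1
    · rw [PySem.List.pyRange_one_eq_nil (by omega)] at hn; cases hn
  exact congrArg String.ofList (pvBody_eq n hn0)
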